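-- pv_equiv track=rewrite | github.com/franciscotaveira/cmo-ai | mkt/engine/src/obsidian.py | _group_metrics_by_type
-- ===== SOURCE A (Python) =====
-- from typing import Dict, List, Any, Optional
--
-- def _group_metrics_by_type(metrics: List[Dict[str, Any]]) -> Dict[str, List[Dict[str, Any]]]:
--     """Agrupa métricas por tipo."""
--     grouped = {}
--
--     for metric in metrics:
--         key = metric.get('metric_key', 'unknown')
--         metric_type = key.rsplit('_', 1)[-1] if '_' in key else key
--
--         if metric_type not in grouped:
--             grouped[metric_type] = []
--
--         grouped[metric_type].append(metric)
--
--     return grouped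
-- ===== SOURCE B (Python) =====
-- def _group_metrics_by_type(metrics):
--     """Agrupa métricas por tipo (two-pass: types once, then one filter per distinct type)."""
--     def type_of(metric):
--         key = metric.get('metric_key', 'unknown')
--         return key.rsplit('_', 1)[-1] if '_' in key else key
--
--     types = [type_of(m) for m in metrics]
--     return {t: [m for m, tm in zip(metrics, types) if tm == t]
--             for t in dict.fromkeys(types)}
-- ===== Notes on version B (the rewrite author's own statement) =====
-- stated objective: alternative
-- what changed: Replaces A's single-pass dict bucketing (setdefault-then-append per metric) with a two-pass decomposition: compute each metric's type once, then build the result with one filter pass per distinct type in first-occurrence order.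
import Mathlib
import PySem

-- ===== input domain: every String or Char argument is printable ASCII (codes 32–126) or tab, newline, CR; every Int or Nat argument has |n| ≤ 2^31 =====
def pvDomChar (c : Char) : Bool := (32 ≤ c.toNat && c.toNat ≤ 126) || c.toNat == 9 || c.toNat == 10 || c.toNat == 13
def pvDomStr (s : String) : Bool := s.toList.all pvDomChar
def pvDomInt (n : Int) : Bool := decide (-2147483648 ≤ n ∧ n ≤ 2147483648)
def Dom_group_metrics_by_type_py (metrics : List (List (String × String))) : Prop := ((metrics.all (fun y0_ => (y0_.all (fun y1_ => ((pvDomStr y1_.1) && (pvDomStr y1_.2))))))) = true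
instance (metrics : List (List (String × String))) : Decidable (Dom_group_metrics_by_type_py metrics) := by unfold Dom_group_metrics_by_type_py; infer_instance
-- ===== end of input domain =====

-- B groups by one filter pass per distinct type (computed once) instead of A's dict bucketing;
-- objective: alternative decomposition, same exact output (keys in first-occurrence order).

-- ===== PORT A =====
-- key = metric.get('metric_key', 'unknown'); type = key.rsplit('_', 1)[-1] if '_' in key else key.
-- rsplit('_', 1)[-1] with '_' in key is exactly the suffix after the LAST '_', i.e. key[key.rfind('_')+1:].
def pvTypeOf (metric : List (String × String)) : String :=
  let key := (PySem.Dict.mk metric).getD "metric_key" "unknown"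
  if PySem.Str.isIn "_" key then
    PySem.Str.slice key (some (PySem.Str.rfind key "_" + 1)) none
  else key

def group_metrics_by_type_py (metrics : List (List (String × String))) : List (String × List (List (String × String))) :=
  (metrics.foldl (fun grouped metric =>
      let metricType := pvTypeOf metric
      -- if metric_type not in grouped: grouped[metric_type] = []
      let grouped := if grouped.contains metricType then grouped
                     else grouped.insert metricType ([] : List (List (String × String)))
      -- grouped[metric_type].append(metric)
      grouped.modify metricType [] (· ++ [metric]))
    PySem.Dict.empty).items

-- ===== PORT B =====
def group_metrics_by_type_py_alt (metrics : List (List (String × String))) : List (String × List (List (String × String))) :=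
  let types := metrics.map pvTypeOf          -- type_of(m) for each metric, once
  (PySem.List.dedup types).map (fun t =>     -- dict.fromkeys(types): first occurrences
    (t, ((metrics.zip types).filter (fun p => p.2 == t)).map (·.1)))

-- ===== PRECONDITION & SPEC =====
def Spec_group_metrics_by_type_py (metrics : List (List (String × String))) (out : List (String × List (List (String × String)))) : Prop := out = group_metrics_by_type_py_alt metrics
instance (metrics : List (List (String × String))) (out : List (String × List (List (String × String)))) : Decidable (Spec_group_metrics_by_type_py metrics out) := by unfold Spec_group_metrics_by_type_py; infer_instance

-- ===== CLAIM (what is proved, stated in full; the proofs are below) =====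
def Claim_equal_group_metrics_by_type_py : Prop := ∀ (metrics : List (List (String × String))), Dom_group_metrics_by_type_py metrics → Spec_group_metrics_by_type_py metrics (group_metrics_by_type_py metrics)

-- ===== LEMMAS AND PROOFS =====

-- A's two-step body (setdefault-style insert, then append) is one Dict.modify with default [].
theorem pv_step_eq (d : PySem.Dict String (List (List (String × String)))) (m : List (String × String)) :
    (if d.contains (pvTypeOf m) then d
     else d.insert (pvTypeOf m) ([] : List (List (String × String)))).modify (pvTypeOf m) [] (· ++ [m])
    = d.modify (pvTypeOf m) [] (· ++ [m]) := by
  by_cases h : d.contains (pvTypeOf m)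
  · simp [h]
  · simp only [h, if_neg, Bool.not_eq_true]
    simp only [PySem.Dict.modify, PySem.Dict.getD_insert_self, PySem.Dict.insert_insert_self,
      PySem.Dict.getD_of_not_contains d [] (by simpa using h)]

theorem pv_fold_eq (metrics : List (List (String × String))) (d : PySem.Dict String (List (List (String × String)))) :
    metrics.foldl (fun grouped metric =>
      (if grouped.contains (pvTypeOf metric) then grouped
       else grouped.insert (pvTypeOf metric) ([] : List (List (String × String)))).modify
        (pvTypeOf metric) [] (· ++ [metric])) d
    = metrics.foldl (fun grouped metric => grouped.modify (pvTypeOf metric) [] (· ++ [metric])) d := by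
  simp only [pv_step_eq]

theorem pv_group_eq_filter (metrics : List (List (String × String))) (c : String) :
    (metrics.foldl (fun grouped metric => grouped.modify (pvTypeOf metric) [] (· ++ [metric]))
      PySem.Dict.empty).getD c []
    = ((metrics.zip (metrics.map pvTypeOf)).filter (fun p => p.2 == c)).map (·.1) := by
  have h1 : metrics.foldl (fun grouped metric => grouped.modify (pvTypeOf metric) [] (· ++ [metric]))
      PySem.Dict.empty
      = (metrics.map (fun m => (pvTypeOf m, m))).foldl
          (fun d p => d.modify p.1 [] (· ++ [p.2])) PySem.Dict.empty := by
    rw [List.foldl_map]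
  rw [h1, PySem.Dict.getD_foldl_modify_append]
  have h2 : metrics.zip (metrics.map pvTypeOf) = metrics.map (fun m => (m, pvTypeOf m)) := by
    clear h1
    induction metrics with
    | nil => rfl
    | cons a t ih => simp [ih]
  rw [h2]
  simp [List.filter_map, Function.comp_def]

-- ===== VERDICT (by name: the statement is the Claim_ definition above) =====
theorem group_metrics_by_type_py_spec : Claim_equal_group_metrics_by_type_py := by
  intro metrics _
  unfold Spec_group_metrics_by_type_py group_metrics_by_type_py group_metrics_by_type_py_alt
  rw [pv_fold_eq]
  set d := metrics.foldl (fun grouped metric => grouped.modify (pvTypeOf metric) [] (· ++ [metric]))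
      PySem.Dict.empty with hd
  have hnd : d.keys.Nodup := by
    rw [hd]
    exact PySem.Dict.nodup_keys_foldl_modify_key metrics pvTypeOf []
      (fun _ m v => v ++ [m]) PySem.Dict.empty (by simp)
  have hkeys : d.keys = PySem.List.dedup (metrics.map pvTypeOf) := by
    rw [hd, PySem.Dict.keys_foldl_modify_key metrics pvTypeOf [] (fun _ m v => v ++ [m])]
    rw [PySem.List.dedup_eq_ofList]
    simp [PySem.Dict.keys_empty, PySem.Set.update_nil_left]
  rw [PySem.Dict.items_eq_map_keys d hnd [], hkeys]
  refine List.map_congr_left (fun c _ => ?_)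
  rw [hd, pv_group_eq_filter]
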